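-- pv_equiv track=rewrite | github.com/Paul-Kyle-Turner/EditString_Dynamic_Greedy_algos | main5.py | edit_string_naive
-- ===== SOURCE A (Python) =====
-- def edit_string_naive(a, b):
--     z = []
--     m = len(a)
--     n = len(b)
--     i = 0
--     j = 0
--     while i < n or j < m:
--         if i >= m:
--             z.append('I')
--             i += 1
--             j += 1
--         elif j >= n:
--             z.append('D')
--             i += 1
--             j += 1
--         elif a[i] == b[i]:
--             z.append('C')
--             i += 1
--             j += 1
--         elif i + 1 > n and a[i] == b[i+1] and a[i+1] == b[i]:
--             z.append('T')
--             i += 2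
--             j += 2
--         else:
--             z.append('R')
--             i += 1
--             j += 1
--     return z
-- ===== SOURCE B (Python) =====
-- def edit_string_naive(a, b):
--     m, n = len(a), len(b)
--     k = min(m, n)
--     # build the whole answer shape first: all-'C' template plus the overhang block
--     z = ['C'] * k + ['I'] * (n - k) + ['D'] * (m - k)
--     # then patch in the replacements at the mismatch positions
--     for i, (x, y) in enumerate(zip(a, b)):
--         if x != y:
--             z[i] = 'R'
--     return z
-- ===== Notes on version B (the rewrite author's own statement) =====
-- stated objective: simpler
-- what changed: Instead of A's stateful while-loop over indices i,j with five branches (one unreachable transposition branch), B pre-builds the full answer as an all-'C' template concatenated with the 'I'/'D' overhang block, then patches 'R' into the mismatch positions found by a single enumerate(zip(a,b)) scan.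
import Mathlib
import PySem

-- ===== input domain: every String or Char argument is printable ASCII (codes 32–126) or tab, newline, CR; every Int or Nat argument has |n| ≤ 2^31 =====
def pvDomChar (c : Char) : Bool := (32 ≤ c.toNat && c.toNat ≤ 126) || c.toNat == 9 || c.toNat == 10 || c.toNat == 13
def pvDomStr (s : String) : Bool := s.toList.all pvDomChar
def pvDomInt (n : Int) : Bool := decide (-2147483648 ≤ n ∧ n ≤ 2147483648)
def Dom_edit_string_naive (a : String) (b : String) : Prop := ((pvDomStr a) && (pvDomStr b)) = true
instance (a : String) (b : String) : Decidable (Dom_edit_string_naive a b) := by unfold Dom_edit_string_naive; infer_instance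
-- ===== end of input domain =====

-- B replaces A's stateful while-loop (with its unreachable 'T' branch) by building the whole
-- answer shape up front (all-'C' template + 'I'/'D' overhang block) and then patching 'R' into
-- the mismatch positions found by one scan over zip(a,b); objective: simpler, same cost.

-- ===== PORT A =====
-- A's while loop, state (i, j), output emitted as the list is built; branches in A's order,
-- including the (unreachable when i = j) transposition branch. The fuel argument is only a
-- totality guard: m + n steps always suffice, since every iteration advances both i and j.
def editLoopA (al bl : List Char) (m n : Nat) : Nat → Nat → Nat → List String
  | 0, _, _ => []
  | fuel+1, i, j =>
    if i < n ∨ j < m then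
      if i ≥ m then
        "I" :: editLoopA al bl m n fuel (i+1) (j+1)
      else if j ≥ n then
        "D" :: editLoopA al bl m n fuel (i+1) (j+1)
      else if al.getD i ' ' = bl.getD i ' ' then
        "C" :: editLoopA al bl m n fuel (i+1) (j+1)
      else if i + 1 > n ∧ al.getD i ' ' = bl.getD (i+1) ' ' ∧ al.getD (i+1) ' ' = bl.getD i ' ' then
        "T" :: editLoopA al bl m n fuel (i+2) (j+2)
      else
        "R" :: editLoopA al bl m n fuel (i+1) (j+1)
    else []

def edit_string_naive (a : String) (b : String) : List String :=
  editLoopA a.toList b.toList a.toList.length b.toList.length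
    (a.toList.length + b.toList.length) 0 0

-- ===== PORT B =====
-- Source B's patch loop: 'for i, (x, y) in enumerate(zip(a, b)): if x != y: z[i] = "R"',
-- transcribed as a structural recursion over the zipped pairs carrying the running index.
def patchB : List (Char × Char) → Nat → List String → List String
  | [], _, z => z
  | (x, y) :: rest, i, z => patchB rest (i+1) (if x ≠ y then z.set i "R" else z)

def edit_string_naive_alt (a : String) (b : String) : List String :=
  let al := a.toList
  let bl := b.toList
  let m := al.length
  let n := bl.length
  let k := min m n
  let z := List.replicate k "C" ++ List.replicate (n - k) "I" ++ List.replicate (m - k) "D"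
  patchB (al.zip bl) 0 z

-- ===== PRECONDITION & SPEC =====
def Spec_edit_string_naive (a : String) (b : String) (out : List String) : Prop := out = edit_string_naive_alt a b
instance (a : String) (b : String) (out : List String) : Decidable (Spec_edit_string_naive a b out) := by unfold Spec_edit_string_naive; infer_instance

-- ===== CLAIM (what is proved, stated in full; the proofs are below) =====
def Claim_equal_edit_string_naive : Prop := ∀ (a : String) (b : String), Dom_edit_string_naive a b → Spec_edit_string_naive a b (edit_string_naive a b)

-- ===== LEMMAS AND PROOFS =====

-- Invariant: from any diagonal state i = j with enough fuel, A's loop emits the remaining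
-- prefix comparisons followed by the appropriate overhang block.
theorem editLoopA_diag (al bl : List Char) (fuel i : Nat)
    (hf : max al.length bl.length ≤ i + fuel) :
    editLoopA al bl al.length bl.length fuel i i =
      (List.range' i (min al.length bl.length - i)).map
        (fun t => if al.getD t ' ' = bl.getD t ' ' then "C" else "R") ++
      (if al.length ≤ bl.length then List.replicate (bl.length - max al.length i) "I"
       else List.replicate (al.length - max bl.length i) "D") := by
  generalize hm : al.length = m at *
  generalize hn : bl.length = n at *
  induction fuel generalizing i with
  | zero =>
    have h1 : min m n - i = 0 := by omega
    have h2 : n - max m i = 0 := by omega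
    have h3 : m - max n i = 0 := by omega
    simp [editLoopA, h1, h2, h3]
  | succ fuel ih =>
    rw [editLoopA]
    by_cases hc : i < n ∨ i < m
    · rw [if_pos hc]
      by_cases h1 : i ≥ m
      · -- 'I' branch: i ≥ m, i < n
        rw [if_pos h1, ih (i+1) (by omega)]
        have h4 : m ≤ n := by omega
        have h5 : n - max m i = (n - max m (i+1)) + 1 := by omega
        have h6 : m - i = 0 := by omega
        have h7 : m - (i+1) = 0 := by omega
        simp [h4, h5, h6, h7, List.replicate_succ]
      · rw [if_neg h1]
        by_cases h2 : i ≥ n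
        · -- 'D' branch: i ≥ n, i < m
          rw [if_pos h2, ih (i+1) (by omega)]
          have h4 : min m n - i = 0 := by omega
          have h5 : min m n - (i+1) = 0 := by omega
          have h6 : ¬ (m ≤ n) := by omega
          have h7 : m - max n i = (m - max n (i+1)) + 1 := by omega
          simp [h4, h5, h6, h7, List.replicate_succ]
        · -- i < m, i < n: 'C' or 'R'; the 'T' guard (i + 1 > n) is false
          rw [if_neg h2]
          have hT : ¬ (i + 1 > n ∧ al.getD i ' ' = bl.getD (i+1) ' ' ∧ al.getD (i+1) ' ' = bl.getD i ' ') := by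
            intro h; omega
          have hrange : min m n - i = (min m n - (i+1)) + 1 := by omega
          have hmax1 : max m i = max m (i+1) := by omega
          have hmax2 : max n i = max n (i+1) := by omega
          rw [hrange, List.range'_succ, List.map_cons, hmax1, hmax2]
          by_cases h3 : al.getD i ' ' = bl.getD i ' '
          · rw [if_pos h3, ih (i+1) (by omega)]
            simp [List.getD] at h3 ⊢
            simp [h3]
          · rw [if_neg h3, if_neg hT, ih (i+1) (by omega)]
            simp [List.getD] at h3 ⊢
            simp [h3]
    · rw [if_neg hc]
      have h1 : min m n - i = 0 := by omega
      have h2 : n - max m i = 0 := by omega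
      have h3 : m - max n i = 0 := by omega
      simp [h1, h2, h3]

-- Patching an all-'C' block of the pairs' length, sitting after a done prefix of length i,
-- yields the per-pair codes in place.
theorem patchB_spec (ps : List (Char × Char)) (done tail : List String)
    (hd : done.length = i) :
    patchB ps i (done ++ List.replicate ps.length "C" ++ tail) =
      done ++ ps.map (fun p => if p.1 = p.2 then "C" else "R") ++ tail := by
  induction ps generalizing done i with
  | nil => simp [patchB]
  | cons p rest ih =>
    obtain ⟨x, y⟩ := p
    rw [List.length_cons, List.replicate_succ, patchB]
    by_cases hxy : x = y
    · simp only [hxy, ne_eq, not_true_eq_false, if_false]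
      have := ih (done := done ++ ["C"]) (i := i + 1) (by simp [hd])
      simpa [List.append_assoc] using this
    · simp only [ne_eq, hxy, not_false_eq_true, if_true]
      have hset : (done ++ ("C" :: (List.replicate rest.length "C" ++ tail))).set i "R"
          = done ++ ("R" :: (List.replicate rest.length "C" ++ tail)) := by
        rw [← hd, List.set_append_right _ _ (le_refl _)]
        simp
      rw [show done ++ (List.replicate rest.length "C").cons "C" ++ tail
            = done ++ ("C" :: (List.replicate rest.length "C" ++ tail)) by simp, hset]
      have := ih (done := done ++ ["R"]) (i := i + 1) (by simp [hd])
      simpa [List.append_assoc, hxy] using this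

-- The per-pair codes of zip equal the indexed comparison map.
theorem zip_map_eq_range_map (al bl : List Char) :
    (al.zip bl).map (fun p => if p.1 = p.2 then "C" else "R") =
      (List.range' 0 (min al.length bl.length)).map
        (fun t => if al.getD t ' ' = bl.getD t ' ' then "C" else "R") := by
  apply List.ext_getElem
  · simp [List.length_zip]
  · intro j h1 h2
    have hj : j < min al.length bl.length := by simpa [List.length_zip] using h1
    have hja : j < al.length := by omega
    have hjb : j < bl.length := by omega
    simp [List.getElem_zip, List.getElem_range', List.getD_eq_getElem?_getD, hja, hjb]

-- ===== VERDICT (by name: the statement is the Claim_ definition above) =====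
theorem edit_string_naive_spec : Claim_equal_edit_string_naive := by
  intro a b _
  unfold Spec_edit_string_naive edit_string_naive edit_string_naive_alt
  rw [editLoopA_diag _ _ _ _ (by omega)]
  have hp := patchB_spec (i := 0) (a.toList.zip b.toList)
      [] (List.replicate (b.toList.length - min a.toList.length b.toList.length) "I" ++
          List.replicate (a.toList.length - min a.toList.length b.toList.length) "D") rfl
  simp only [List.length_zip, List.nil_append, ← List.append_assoc] at hp
  rw [hp, zip_map_eq_range_map]
  simp only [Nat.sub_zero, Nat.max_zero]
  rw [List.append_assoc]
  congr 1
  by_cases h : a.toList.length ≤ b.toList.length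
  · rw [if_pos h, Nat.min_eq_left h, Nat.sub_self]
    simp
  · have h' : b.toList.length ≤ a.toList.length := Nat.le_of_not_le h
    rw [if_neg h, Nat.min_eq_right h', Nat.sub_self]
    simp
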